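-- pv_equiv track=rewrite | github.com/AkumaEX/beecrowd | STRINGS/1235/main.py | decypher
-- ===== SOURCE A (Python) =====
-- def decypher(word):
--     length = len(word)
--     middle = length // 2
--     result = [''] * length
--     chars = list(word)
--     for i in range(length):
--         result[length - 1 - i] = chars[(middle + i) % length]
--     return ''.join(result)
-- ===== SOURCE B (Python) =====
-- def decypher(word):
--     middle = len(word) // 2
--     return ''.join((word[middle:] + word[:middle])[::-1])
-- ===== Notes on version B (the rewrite author's own statement) =====
-- stated objective: simpler
-- what changed: Replaces the scatter-placement loop with modular indexing by a closed form: B swaps the two halves with slices and reverses the whole string, no loop or index arithmetic.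
import Mathlib
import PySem

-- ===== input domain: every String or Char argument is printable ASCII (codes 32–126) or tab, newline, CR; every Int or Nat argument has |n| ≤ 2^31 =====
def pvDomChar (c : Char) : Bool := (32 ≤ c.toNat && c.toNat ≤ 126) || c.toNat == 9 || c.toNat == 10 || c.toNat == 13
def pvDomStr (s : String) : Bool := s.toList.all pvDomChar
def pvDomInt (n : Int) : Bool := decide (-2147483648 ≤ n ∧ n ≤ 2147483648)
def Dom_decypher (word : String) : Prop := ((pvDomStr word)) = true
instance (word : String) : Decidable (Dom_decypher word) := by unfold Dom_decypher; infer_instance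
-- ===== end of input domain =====

-- B replaces A's scatter-placement loop (modular indexing into a preallocated list)
-- by a closed form: swap the two halves with slices and reverse; objective: simpler.


-- ===== PORT A =====
-- result[length-1-i] = chars[(middle+i) % length]; the index is always in range, so
-- List.getD is exact here (the ' ' default and the ' ' initial slots are never observed).
def decypher (word : String) : String :=
  let chars := word.toList
  let length := chars.length
  let middle := length / 2
  String.mk ((List.range length).foldl
    (fun result i => result.set (length - 1 - i) (chars.getD ((middle + i) % length) ' '))
    (List.replicate length ' '))

-- ===== PORT B =====
-- (word[middle:] + word[:middle])[::-1]
def decypher_alt (word : String) : String :=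
  let chars := word.toList
  let middle := chars.length / 2
  String.mk ((chars.drop middle ++ chars.take middle).reverse)

-- ===== PRECONDITION & SPEC =====
def Spec_decypher (word : String) (out : String) : Prop := out = decypher_alt word
instance (word : String) (out : String) : Decidable (Spec_decypher word out) := by unfold Spec_decypher; infer_instance

-- ===== CLAIM (what is proved, stated in full; the proofs are below) =====
def Claim_equal_decypher : Prop := ∀ (word : String), Dom_decypher word → Spec_decypher word (decypher word)

-- ===== LEMMAS AND PROOFS =====

-- A's loop scatters f i into slot length-1-i: after j steps the tail of the buffer
-- holds the first j values of f, reversed.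
lemma pv_scatter (f : Nat → Char) (init : List Char) (n j : Nat) (hn : init.length = n)
    (h : j ≤ n) :
    (List.range j).foldl (fun res i => res.set (n - 1 - i) (f i)) init
      = init.take (n - j) ++ ((List.range j).map f).reverse := by
  subst hn
  induction j with
  | zero => simp
  | succ j ih =>
    rw [List.range_succ, List.foldl_append, ih (by omega)]
    simp only [List.foldl_cons, List.foldl_nil, List.map_append, List.map_cons, List.map_nil,
      List.reverse_append, List.reverse_cons, List.reverse_nil, List.nil_append]
    rw [List.set_append_left _ _ (by simp; omega),
        List.set_eq_take_cons_drop _ (by simp; omega)]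
    have h1 : (init.take (init.length - j)).take (init.length - 1 - j)
        = init.take (init.length - (j + 1)) := by
      rw [List.take_take]; congr 1; omega
    have h2 : (init.take (init.length - j)).drop (init.length - 1 - j + 1) = [] := by
      apply List.drop_eq_nil_of_le; simp; omega
    rw [h1, h2]; simp

-- the values A scatters, in loop order, are exactly B's rotated word
lemma pv_rot (chars : List Char) :
    (List.range chars.length).map
        (fun i => chars.getD ((chars.length / 2 + i) % chars.length) ' ')
      = chars.drop (chars.length / 2) ++ chars.take (chars.length / 2) := by
  apply List.ext_getElem
  · simp; omega
  · intro i h1 h2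
    simp only [List.getElem_map, List.getElem_range]
    have hi : i < chars.length := by simpa using h1
    rcases Nat.lt_or_ge i (chars.length - chars.length / 2) with hc | hc
    · rw [List.getElem_append_left (by simpa using hc)]
      rw [Nat.mod_eq_of_lt (by omega), List.getD_eq_getElem _ _ (by omega),
        List.getElem_drop]
    · rw [List.getElem_append_right (by simpa using hc)]
      have hm : chars.length / 2 < chars.length := by omega
      have : (chars.length / 2 + i) % chars.length
          = chars.length / 2 + i - chars.length := by
        rw [Nat.mod_eq_sub_mod (by omega), Nat.mod_eq_of_lt (by omega)]
      rw [this, List.getD_eq_getElem _ _ (by omega), List.getElem_take]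
      congr 1; simp; omega

-- ===== VERDICT (by name: the statement is the Claim_ definition above) =====
theorem decypher_spec : Claim_equal_decypher := by
  intro word _
  show decypher word = decypher_alt word
  unfold decypher decypher_alt
  simp only
  rw [pv_scatter _ _ _ _ (by simp) le_rfl, pv_rot]
  simp
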